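-- pv_equiv track=rewrite | github.com/ttvpro007/PythonProblems | labs109.py | get_any_numbers_score
-- ===== SOURCE A (Python) =====
-- def get_any_numbers_score(dice):
--
--     dice_frequency_dict = {}
--
--     for i in range(len(dice)):
--         if dice[i] not in dice_frequency_dict:
--             dice_frequency_dict[dice[i]] = 1
--
--         else:
--             dice_frequency_dict[dice[i]] += 1
--
--     return max(entry[0] * entry[1] for entry in dice_frequency_dict.items())
-- ===== SOURCE B (Python) =====
-- def get_any_numbers_score(dice):
--     s = sorted(dice)
--     best = None
--     prev = s[0]
--     run = 0
--     for v in s: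
--         if v == prev:
--             run += 1
--         else:
--             score = prev * run
--             if best is None or score > best:
--                 best = score
--             prev = v
--             run = 1
--     score = prev * run
--     if best is None or score > best:
--         best = score
--     return best
-- ===== Notes on version B (the rewrite author's own statement) =====
-- stated objective: alternative
-- what changed: Replaces the frequency-dict build plus a max over dict items by sorting the dice and a single run-length scan over consecutive equal values, keeping a running best of value*run-length; Pre_ excludes only the empty list, on which A raises ValueError (and B raises IndexError).
import Mathlib
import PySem

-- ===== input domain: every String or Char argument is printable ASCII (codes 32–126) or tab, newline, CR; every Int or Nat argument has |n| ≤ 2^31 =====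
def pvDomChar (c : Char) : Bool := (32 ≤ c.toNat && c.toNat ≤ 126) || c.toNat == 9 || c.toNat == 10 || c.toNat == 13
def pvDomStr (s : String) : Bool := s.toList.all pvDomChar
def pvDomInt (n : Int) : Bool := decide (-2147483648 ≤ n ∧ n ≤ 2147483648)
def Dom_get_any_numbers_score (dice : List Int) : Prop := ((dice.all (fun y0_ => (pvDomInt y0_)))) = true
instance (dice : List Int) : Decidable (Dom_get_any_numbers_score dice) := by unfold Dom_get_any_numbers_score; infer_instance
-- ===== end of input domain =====

-- B replaces A's frequency dict + max over its items by sorting the dice and one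
-- run-length scan over consecutive equal values (alternative decomposition, not claimed faster).

-- ===== PORT A =====
-- literal transliteration of A: build a frequency dict over index range, then max of k*v over items
def get_any_numbers_score (dice : List Int) : Int :=
  let d := (PySem.List.pyRange 0 (PySem.List.len dice)).foldl
    (fun (d : PySem.Dict Int Int) i =>
      if d.contains (PySem.List.pyGetD dice i 0) = false then
        d.insert (PySem.List.pyGetD dice i 0) 1
      else
        d.insert (PySem.List.pyGetD dice i 0) (d.getD (PySem.List.pyGetD dice i 0) 0 + 1))
    PySem.Dict.empty
  -- Python's max(...) raises ValueError on an empty dict; excluded by Pre_, .getD 0 is never used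
  (PySem.List.max? (d.items.map (fun e => e.1 * e.2)) (fun x => x)).getD 0

-- ===== PORT B =====
-- 'if best is None or score > best: best = score'
def updBest (best : Option Int) (score : Int) : Option Int :=
  match best with
  | none => some score
  | some b => if score > b then some score else some b

-- one iteration of B's run-length scan; state = (best, prev, run)
def altStep (st : Option Int × Int × Int) (v : Int) : Option Int × Int × Int :=
  match st with
  | (best, prev, run) =>
    if v == prev then (best, prev, run + 1)
    else (updBest best (prev * run), v, 1)

def get_any_numbers_score_alt (dice : List Int) : Int :=
  match PySem.List.sorted dice (fun x => x) false with
  | [] => 0      -- B's Python raises IndexError here (s[0] on []); excluded by Pre_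
  | h :: t =>
    let st := (h :: t).foldl altStep (none, h, 0)
    (updBest st.1 (st.2.1 * st.2.2)).getD 0   -- best is never none here; .getD 0 unreachable

-- ===== PRECONDITION & SPEC =====
-- On the empty list A raises ValueError (max of an empty sequence); excluded.
def Pre_get_any_numbers_score (dice : List Int) : Prop := dice ≠ []
instance (dice : List Int) : Decidable (Pre_get_any_numbers_score dice) := by unfold Pre_get_any_numbers_score; infer_instance
def pvWitness_get_any_numbers_score : List Int := [3, 1, 3, 2]

def Spec_get_any_numbers_score (dice : List Int) (out : Int) : Prop := out = get_any_numbers_score_alt dice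
instance (dice : List Int) (out : Int) : Decidable (Spec_get_any_numbers_score dice out) := by unfold Spec_get_any_numbers_score; infer_instance

-- ===== CLAIM (what is proved, stated in full; the proofs are below) =====
def Claim_equal_get_any_numbers_score : Prop := ∀ (dice : List Int), Dom_get_any_numbers_score dice → Pre_get_any_numbers_score dice → Spec_get_any_numbers_score dice (get_any_numbers_score dice)

-- ===== LEMMAS AND PROOFS =====

lemma updBest_eq (b : Option Int) (s : Int) :
    updBest b s = some (match b with | none => s | some x => max x s) := by
  cases b with
  | none => rfl
  | some x => simp only [updBest]; split_ifs <;> simp <;> omega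

lemma updBest_rcomm (b : Option Int) (x y : Int) :
    updBest (updBest b x) y = updBest (updBest b y) x := by
  cases b <;> simp only [updBest_eq] <;> simp <;> omega

lemma foldl_updBest_some (t : List Int) (b : Int) :
    t.foldl updBest (some b) = some (t.foldl max b) := by
  induction t generalizing b with
  | nil => rfl
  | cons v t ih =>
      rw [List.foldl_cons, updBest_eq, ih, List.foldl_cons]

lemma max?_eq_foldl_updBest (l : List Int) :
    PySem.List.max? l (fun y => y) = l.foldl updBest none := by
  cases l with
  | nil => simp [PySem.List.max?_eq_none_iff]
  | cons x t => simp [PySem.List.max?_id_cons, updBest, foldl_updBest_some]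

lemma foldl_updBest_perm {l l' : List Int} (h : l.Perm l') :
    l.foldl updBest none = l'.foldl updBest none :=
  List.Perm.foldl_eq (rcomm := ⟨fun b x y => updBest_rcomm b x y⟩) h none

-- dedup facts (PySem.List.dedup keeps first occurrences)
lemma foldl_add_cons (l : List Int) (s : List Int) (a : Int) (h : a ∉ l) :
    l.foldl PySem.Set.add (a :: s) = a :: l.foldl PySem.Set.add s := by
  induction l generalizing s with
  | nil => rfl
  | cons v t ih =>
      have hva : ¬ (v = a) := fun hv => h (hv ▸ List.mem_cons_self)
      have ht : a ∉ t := fun hm => h (List.mem_cons_of_mem _ hm)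
      simp only [List.foldl_cons]
      rw [show PySem.Set.add (a :: s) v = a :: PySem.Set.add s v by
        simp [PySem.Set.add, PySem.Set.contains, hva]
        split_ifs <;> simp]
      exact ih _ ht

lemma dedup_cons_of_not_mem (a : Int) (l : List Int) (h : a ∉ l) :
    PySem.List.dedup (a :: l) = a :: PySem.List.dedup l := by
  simp only [PySem.List.dedup_eq_ofList, PySem.Set.ofList_eq_foldl, List.foldl_cons]
  exact foldl_add_cons l _ a h

lemma dedup_cons_cons (a : Int) (l : List Int) :
    PySem.List.dedup (a :: a :: l) = PySem.List.dedup (a :: l) := by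
  simp only [PySem.List.dedup_eq_ofList, PySem.Set.ofList_eq_foldl, List.foldl_cons]
  congr 1
  simp [PySem.Set.add, PySem.Set.contains]

-- the run-length scan on a sorted tail computes the fold of updBest over per-value scores
lemma scan_eq (t : List Int) (best : Option Int) (prev run : Int)
    (hs : t.Pairwise (· ≤ ·)) (hge : ∀ x ∈ t, prev ≤ x) :
    (updBest (t.foldl altStep (best, prev, run)).1
      ((t.foldl altStep (best, prev, run)).2.1 * (t.foldl altStep (best, prev, run)).2.2)) =
    ((PySem.List.dedup (prev :: t)).map
      (fun v => v * (if v = prev then run + (t.count v : Int) else (t.count v : Int)))).foldl updBest best := by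
  induction t generalizing best prev run with
  | nil =>
      rw [show PySem.List.dedup [prev] = [prev] from dedup_cons_of_not_mem prev [] (by simp)]
      simp
  | cons v t ih =>
      have hs' : t.Pairwise (· ≤ ·) := hs.tail
      have hvle : ∀ x ∈ t, v ≤ x := fun x hx => (List.pairwise_cons.mp hs).1 x hx
      by_cases hv : v = prev
      · subst hv
        have step : altStep (best, v, run) v = (best, v, run + 1) := by
          simp [altStep]
        rw [List.foldl_cons, step, ih best v (run + 1) hs' hvle, dedup_cons_cons]
        refine congrArg (fun l => List.foldl updBest best l) (List.map_congr_left ?_)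
        intro u _
        by_cases hu : u = v
        · subst hu
          simp only [List.count_cons_self]
          push_cast; ring
        · rw [if_neg hu, if_neg hu]
          simp [List.count_cons]
          exact Or.inl (fun h => hu h.symm)
      · have hlt : prev < v := lt_of_le_of_ne (hge v List.mem_cons_self) (fun h => hv h.symm)
        have hnm : prev ∉ (v :: t) := by
          intro hm
          rcases List.mem_cons.mp hm with h | h
          · exact absurd h.symm hv
          · exact absurd (hvle _ h) (not_le.mpr hlt)
        have step : altStep (best, prev, run) v = (updBest best (prev * run), v, 1) := by
          simp [altStep, beq_iff_eq, hv]
        rw [List.foldl_cons, step, ih (updBest best (prev * run)) v 1 hs' hvle,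
            dedup_cons_of_not_mem prev (v :: t) hnm]
        have hc0 : ((v :: t).count prev : Int) = 0 := by
          simp [List.count_eq_zero_of_not_mem hnm]
        simp only [List.map_cons, List.foldl_cons, hc0, add_zero]
        refine congrArg (fun l => List.foldl updBest (updBest best (prev * run)) l)
          (List.map_congr_left ?_)
        intro u hu
        have humem : u ∈ v :: t := by
          have := PySem.Set.mem_ofList (v :: t) u
          rw [PySem.List.dedup_eq_ofList] at hu
          exact this.mp hu
        have hune : ¬ (u = prev) := fun h => hnm (h ▸ humem)
        rw [if_neg hune]
        by_cases huv : u = v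
        · subst huv
          simp only [List.count_cons_self]
          push_cast; ring
        · rw [if_neg huv]
          simp [List.count_cons]
          exact Or.inl (fun h => huv h.symm)

-- B computes the fold of updBest over v * count(v) for the distinct values of the sorted list
lemma alt_eq (dice : List Int) (h : dice ≠ []) :
    get_any_numbers_score_alt dice =
      (((PySem.List.dedup (PySem.List.sorted dice (fun x => x) false)).map
        (fun v => v * ((PySem.List.sorted dice (fun x => x) false).count v : Int))).foldl
        updBest none).getD 0 := by
  rcases hs : PySem.List.sorted dice (fun x => x) false with _ | ⟨hd, tl⟩
  · exact absurd ((PySem.List.sorted_eq_nil_iff dice _ _).mp hs) h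
  · have hpw : (hd :: tl).Pairwise (· ≤ ·) := by
      have := PySem.List.sorted_pairwise dice (fun x => x)
      rw [hs] at this; exact this
    have hge : ∀ x ∈ tl, hd ≤ x := fun x hx => (List.pairwise_cons.mp hpw).1 x hx
    have step1 : altStep (none, hd, 0) hd = (none, hd, 1) := by simp [altStep]
    unfold get_any_numbers_score_alt
    rw [hs]
    simp only [List.foldl_cons, step1]
    rw [scan_eq tl none hd 1 hpw.tail hge]
    apply congrArg (fun l => ((List.foldl updBest none l).getD 0 : Int))
    apply List.map_congr_left
    intro u _
    by_cases hu : u = hd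
    · subst hu; simp
      omega
    · simp [hu, List.count_cons]
      exact Or.inl (fun h => hu h.symm)

-- A's index loop is the counter fold
lemma a_fold_eq (dice : List Int) :
    (PySem.List.pyRange 0 (PySem.List.len dice)).foldl
      (fun (d : PySem.Dict Int Int) i =>
        if d.contains (PySem.List.pyGetD dice i 0) = false then
          d.insert (PySem.List.pyGetD dice i 0) 1
        else
          d.insert (PySem.List.pyGetD dice i 0) (d.getD (PySem.List.pyGetD dice i 0) 0 + 1))
      PySem.Dict.empty = PySem.Dict.counter dice := by
  have h := PySem.List.foldl_pyRange_pyGetD dice 0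
    (fun (d : PySem.Dict Int Int) x =>
      if d.contains x = false then d.insert x 1 else d.insert x (d.getD x 0 + 1))
    PySem.Dict.empty (le_refl 0)
  simp only [Int.toNat_zero, List.drop_zero] at h
  rw [h]
  rw [show (fun (d : PySem.Dict Int Int) x =>
      if d.contains x = false then d.insert x 1 else d.insert x (d.getD x 0 + 1)) =
      (fun (d : PySem.Dict Int Int) x => d.insert x (d.getD x 0 + 1)) from ?_]
  · exact PySem.Dict.foldl_insert_getD_add_one_eq_counter dice
  · funext d x
    by_cases hc : d.contains x
    · simp [hc]
    · simp [Bool.not_eq_true] at hc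
      simp [hc, PySem.Dict.getD_of_not_contains d 0 hc]

-- ===== VERDICT (by name: the statement is the Claim_ definition above) =====
theorem get_any_numbers_score_spec : Claim_equal_get_any_numbers_score := by
  intro dice _ hpre
  unfold Spec_get_any_numbers_score
  unfold get_any_numbers_score
  rw [a_fold_eq dice]
  show (PySem.List.max? ((PySem.Dict.counter dice).items.map (fun e => e.1 * e.2)) (fun x => x)).getD 0 =
    get_any_numbers_score_alt dice
  rw [PySem.Dict.items_counter, alt_eq dice hpre]
  simp only [List.map_map]
  rw [max?_eq_foldl_updBest]
  have hperm : (PySem.List.sorted dice (fun x => x) false).Perm dice :=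
    PySem.List.sorted_perm dice _ _
  have hmap :
      ((PySem.List.dedup (PySem.List.sorted dice (fun x => x) false)).map
        (fun v => v * ((PySem.List.sorted dice (fun x => x) false).count v : Int))).Perm
      ((PySem.Set.ofList dice).map ((fun e => e.1 * e.2) ∘ (fun k => (k, (dice.count k : Int))))) := by
    have hd : (PySem.List.dedup (PySem.List.sorted dice (fun x => x) false)).Perm
        (PySem.Set.ofList dice) := by
      rw [PySem.List.dedup_eq_ofList]
      refine (List.perm_ext_iff_of_nodup (PySem.Set.nodup_ofList _) (PySem.Set.nodup_ofList _)).mpr ?_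
      intro a
      rw [PySem.Set.mem_ofList, PySem.Set.mem_ofList]
      exact hperm.mem_iff
    have hfun : (fun v => v * ((PySem.List.sorted dice (fun x => x) false).count v : Int)) =
        ((fun e => e.1 * e.2) ∘ (fun k : Int => (k, (dice.count k : Int)))) := by
      funext v
      simp [Function.comp, hperm.count_eq]
    rw [hfun]
    exact hd.map _
  rw [foldl_updBest_perm hmap.symm]
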